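-- pv_equiv track=rewrite | github.com/RunToCoding/Algorithm-v2 | Programmers/PG17677_JY.py | splitTwoWord
-- ===== SOURCE A (Python) =====
-- def splitTwoWord(str, wordDict, num) :
--     lenS = len(str)-1
--
--     wordLen = 0
--     for i in range(lenS):
--         s1, s2 = str[i].lower(), str[i+1].lower()
--
--         # ord(a) = 97 / ord(z) = 122 => 영어가 아니면
--         if ord(s1) < 97 or ord(s1) > 122:
--             if ord(s2) < 97 or ord(s2) > 122: # 다음 글자도 영어가 아니면
--                 i += 1
--         else : # 영어가 맞다면
--             if ord(s2) < 97 or ord(s2) > 122 : # 다음 글자가 영어가 아니면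
--                 i += 1
--             else :
--                 if s1+s2 in wordDict.keys():
--                     wordDict[s1+s2][num] += 1
--                 else :
--                     wordDict[s1+s2] = [0 ,0]
--                     wordDict[s1+s2][num] = 1
--                 wordLen += 1
--     return wordDict, wordLen
-- ===== SOURCE B (Python) =====
-- def splitTwoWord(str, wordDict, num):
--     s = str.lower()
--     words = [s[i] + s[i + 1] for i in range(len(s) - 1)
--              if 'a' <= s[i] <= 'z' and 'a' <= s[i + 1] <= 'z']
--     for w in dict.fromkeys(words):
--         cnt = words.count(w)
--         if w in wordDict:
--             wordDict[w][num] += cnt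
--         else:
--             entry = [0, 0]
--             entry[num] = cnt
--             wordDict[w] = entry
--     return wordDict, len(words)
-- ===== Notes on version B (the rewrite author's own statement) =====
-- stated objective: alternative
-- what changed: A makes one pass over adjacent pairs doing a dict membership test and list-cell update per pair; B first extracts the list of lowercased two-letter words by comprehension, then loops over its distinct words only, computing each word's total with list.count and applying it to wordDict once per distinct word (no per-pair dict mutation).
import Mathlib
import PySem

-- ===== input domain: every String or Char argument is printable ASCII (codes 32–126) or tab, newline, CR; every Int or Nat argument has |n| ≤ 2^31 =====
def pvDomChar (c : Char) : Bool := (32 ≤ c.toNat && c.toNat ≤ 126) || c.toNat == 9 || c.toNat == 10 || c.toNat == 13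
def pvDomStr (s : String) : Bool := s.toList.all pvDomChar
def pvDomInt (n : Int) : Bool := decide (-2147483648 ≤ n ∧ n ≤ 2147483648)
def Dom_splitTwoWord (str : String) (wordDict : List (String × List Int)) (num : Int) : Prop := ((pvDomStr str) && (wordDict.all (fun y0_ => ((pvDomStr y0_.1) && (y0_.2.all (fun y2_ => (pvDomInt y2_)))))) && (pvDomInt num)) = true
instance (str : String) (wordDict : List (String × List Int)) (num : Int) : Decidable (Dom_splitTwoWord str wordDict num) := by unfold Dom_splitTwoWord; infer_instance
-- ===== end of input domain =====

-- B replaces A's single per-pair dict-update pass by: extract the list of lowercased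
-- two-letter words, then loop over its DISTINCT words only, computing each word's total
-- with list.count and applying it to wordDict once per distinct word; objective:
-- alternative. The Python functions mutate wordDict in place (B performs the same
-- mutations); the theorems below are about the returned value.

-- ===== PORT A =====
-- Python list cell assignment xs[i] = x  (and xs[i] += …): exact where the index is in
-- range; where Python raises IndexError the helpers return the list unchanged — those
-- inputs are excluded by Pre_splitTwoWord.
def pyListSet (l : List Int) (i : Int) (x : Int) : List Int :=
  match PySem.List.pyIdx? l.length i with
  | some k => l.set k x
  | none => l

def pyListModify (l : List Int) (i : Int) (f : Int → Int) : List Int :=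
  match PySem.List.pyIdx? l.length i with
  | some k => l.set k (f (l.getD k 0))
  | none => l

-- literal transliteration of A: one pass over i in range(len(str)-1); each iteration reads
-- str[i] and str[i+1], lowercases them and updates the dict / pair counter (splitA_step).
-- (str[i] is always in range for i drawn from range(len(str)-1), so the ' ' default of
-- pyGet? is never used)
def splitA_step (num : Int) (st : PySem.Dict String (List Int) × Int) (c1 c2 : Char) :
    PySem.Dict String (List Int) × Int :=
  let s1 := PySem.Chars.lowerChar c1
  let s2 := PySem.Chars.lowerChar c2
  if s1.toNat < 97 ∨ 122 < s1.toNat then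
    if s2.toNat < 97 ∨ 122 < s2.toNat then st else st   -- Python's 'i += 1' in a for-loop has no effect
  else
    if s2.toNat < 97 ∨ 122 < s2.toNat then st
    else
      let w := String.ofList [s1, s2]
      let d :=
        match st.1.get? w with
        | some v => st.1.insert w (pyListModify v num (· + 1))
        | none => st.1.insert w (pyListSet [0, 0] num 1)   -- wordDict[w]=[0,0]; wordDict[w][num]=1
      (d, st.2 + 1)

def splitTwoWord (str : String) (wordDict : List (String × List Int)) (num : Int) : (List (String × List Int)) × Int :=
  let lenS : Int := PySem.Str.len str - 1
  let r :=
    (PySem.List.pyRange 0 lenS 1).foldl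
      (fun st i =>
        splitA_step num st ((PySem.Str.pyGet? str i).getD ' ') ((PySem.Str.pyGet? str (i + 1)).getD ' '))
      ((⟨wordDict⟩ : PySem.Dict String (List Int)), 0)
  (r.1.items, r.2)

-- ===== PORT B =====
-- literal transliteration of B (Source B): build the list of lowercased two-letter words by
-- comprehension (ported as the accumulating fold over range(len(s)-1)), then for each
-- distinct word (dict.fromkeys = PySem.List.dedup) apply its total count (list.count)
-- to wordDict in one step
def splitTwoWord_alt (str : String) (wordDict : List (String × List Int)) (num : Int) : (List (String × List Int)) × Int :=
  let s := (PySem.Str.lower str).toList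
  let words : List String :=
    (PySem.List.pyRange 0 ((s.length : Int) - 1) 1).foldl
      (fun acc i =>
        let c1 := (PySem.List.pyGet? s i).getD ' '
        let c2 := (PySem.List.pyGet? s (i + 1)).getD ' '
        if ('a' ≤ c1 ∧ c1 ≤ 'z') ∧ ('a' ≤ c2 ∧ c2 ≤ 'z') then acc ++ [String.ofList [c1, c2]]
        else acc) []
  let d :=
    (PySem.List.dedup words).foldl
      (fun (d : PySem.Dict String (List Int)) w =>
        let cnt : Int := (words.count w : Int)
        match d.get? w with
        | some v => d.insert w (pyListModify v num (· + cnt))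
        | none => d.insert w (pyListSet [0, 0] num cnt))
      (⟨wordDict⟩ : PySem.Dict String (List Int))
  (d.items, (words.length : Int))

-- ===== PRECONDITION & SPEC =====
-- helpers for Pre_: the two-letter words A looks up, read off the input string
def goodChar (c : Char) : Bool := 97 ≤ c.toNat && c.toNat ≤ 122
def goodPair (ab : Char × Char) : Bool := goodChar ab.1 && goodChar ab.2
def lowPairs (l : List Char) : List (Char × Char) :=
  (l.zip l.tail).map (fun ab => (PySem.Chars.lowerChar ab.1, PySem.Chars.lowerChar ab.2))
def letterWords (str : String) : List String :=
  ((lowPairs str.toList).filter goodPair).map (fun ab => String.ofList [ab.1, ab.2])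

-- Pre_ excludes exactly the inputs on which the Python A raises IndexError: some adjacent
-- lowercased letter pair of str names a word whose count list (the wordDict entry if
-- present, else the fresh [0, 0]) is not validly indexed by num.
def Pre_splitTwoWord (str : String) (wordDict : List (String × List Int)) (num : Int) : Prop :=
  ∀ w ∈ letterWords str,
    let L : Int := ((wordDict.find? (fun q => q.1 == w)).map (fun q => q.2.length)).getD 2;
    (-L ≤ num ∧ num < L)
instance (str : String) (wordDict : List (String × List Int)) (num : Int) : Decidable (Pre_splitTwoWord str wordDict num) := by unfold Pre_splitTwoWord; infer_instance

def pvWitness_splitTwoWord : String × (List (String × List Int)) × Int := ("Lean ab", [("xy", [3, 4])], 1)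

def Spec_splitTwoWord (str : String) (wordDict : List (String × List Int)) (num : Int) (out : (List (String × List Int)) × Int) : Prop := out = splitTwoWord_alt str wordDict num
instance (str : String) (wordDict : List (String × List Int)) (num : Int) (out : (List (String × List Int)) × Int) : Decidable (Spec_splitTwoWord str wordDict num out) := by unfold Spec_splitTwoWord; infer_instance

-- ===== CLAIM (what is proved, stated in full; the proofs are below) =====
def Claim_equal_splitTwoWord : Prop := ∀ (str : String) (wordDict : List (String × List Int)) (num : Int), Dom_splitTwoWord str wordDict num → Pre_splitTwoWord str wordDict num → Spec_splitTwoWord str wordDict num (splitTwoWord str wordDict num)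

-- ===== LEMMAS AND PROOFS =====

-- the per-word dict update A performs at each letter pair, and the per-(word, count)
-- update B performs at each distinct word (these are the step functions of the two ports)
def bump1 (num : Int) (d : PySem.Dict String (List Int)) (w : String) : PySem.Dict String (List Int) :=
  match d.get? w with
  | some v => d.insert w (pyListModify v num (· + 1))
  | none => d.insert w (pyListSet [0, 0] num 1)

def bumpC (num : Int) (d : PySem.Dict String (List Int)) (wc : String × Int) : PySem.Dict String (List Int) :=
  match d.get? wc.1 with
  | some v => d.insert wc.1 (pyListModify v num (· + wc.2))
  | none => d.insert wc.1 (pyListSet [0, 0] num wc.2)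

-- list-cell lemmas
theorem pyIdx?_lt {n : Nat} {i : Int} {k : Nat} (h : PySem.List.pyIdx? n i = some k) : k < n := by
  unfold PySem.List.pyIdx? at h; split_ifs at h <;> simp_all <;> omega

theorem length_pyListSet (l : List Int) (i : Int) (x : Int) : (pyListSet l i x).length = l.length := by
  unfold pyListSet; cases h : PySem.List.pyIdx? l.length i <;> simp

theorem pyListModify_pyListSet (l : List Int) (i : Int) (c : Int) (f : Int → Int) :
    pyListModify (pyListSet l i c) i f = pyListSet l i (f c) := by
  unfold pyListModify
  rw [length_pyListSet]
  cases h : PySem.List.pyIdx? l.length i with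
  | none => simp [pyListSet, h]
  | some k =>
    have hk := pyIdx?_lt h
    simp only [pyListSet, h]
    rw [List.getD_eq_getElem?_getD, List.getElem?_set_self (by simpa using hk)]
    simp [List.set_set]

theorem pyListModify_pyListModify (l : List Int) (i : Int) (f g : Int → Int) :
    pyListModify (pyListModify l i f) i g = pyListModify l i (fun x => g (f x)) := by
  cases h : PySem.List.pyIdx? l.length i with
  | none => simp [pyListModify, h]
  | some k =>
    have h1 : pyListModify l i f = pyListSet l i (f (l.getD k 0)) := by simp [pyListModify, pyListSet, h]
    rw [h1, pyListModify_pyListSet]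
    simp [pyListModify, pyListSet, h]

-- dict-step lemmas
theorem bumpC_one (num : Int) (d : PySem.Dict String (List Int)) (w : String) :
    bumpC num d (w, 1) = bump1 num d w := by
  cases h : d.get? w <;> simp [bumpC, bump1, h]

theorem bump1_bumpC (num : Int) (d : PySem.Dict String (List Int)) (w : String) (c : Int) :
    bump1 num (bumpC num d (w, c)) w = bumpC num d (w, c + 1) := by
  cases h : d.get? w with
  | none =>
    simp only [bumpC, bump1, h, PySem.Dict.get?_insert_self, PySem.Dict.insert_insert_self,
      pyListModify_pyListSet]
  | some v =>
    simp only [bumpC, bump1, h, PySem.Dict.get?_insert_self, PySem.Dict.insert_insert_self,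
      pyListModify_pyListModify]
    congr 2
    funext x; ring

theorem contains_bumpC (num : Int) (d : PySem.Dict String (List Int)) (wc : String × Int) :
    (bumpC num d wc).contains wc.1 = true := by
  cases h : d.get? wc.1 <;> simp [bumpC, h]

theorem contains_bumpC_other (num : Int) (d : PySem.Dict String (List Int)) (wc : String × Int) (w : String)
    (h : d.contains w = true) : (bumpC num d wc).contains w = true := by
  cases hg : d.get? wc.1 <;> simp [bumpC, hg, PySem.Dict.contains_insert, h]

theorem insert_comm_of_ne (d : PySem.Dict String (List Int)) (k w : String) (X Y : List Int)
    (hw : d.contains w = true) (hne : k ≠ w) :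
    (d.insert k X).insert w Y = (d.insert w Y).insert k X := by
  have hw1 : (d.insert k X).contains w = true := by
    simp [PySem.Dict.contains_insert, hw]
  have hw2 : (d.insert w Y).contains k = (d.contains k) := by
    simp [PySem.Dict.contains_insert, hne]
  cases hk : d.contains k with
  | true =>
    have hk1 : (d.insert w Y).contains k = true := by rw [hw2, hk]
    apply PySem.Dict.ext
    rw [PySem.Dict.items_insert_of_contains _ _ hw1, PySem.Dict.items_insert_of_contains _ _ hk,
        PySem.Dict.items_insert_of_contains _ _ hk1, PySem.Dict.items_insert_of_contains _ _ hw,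
        List.map_map, List.map_map]
    apply List.map_congr_left
    intro p _
    by_cases h1 : p.1 = k <;> by_cases h2 : p.1 = w <;>
      simp [Function.comp, h1, h2, hne, Ne.symm hne]
  | false =>
    have hk1 : (d.insert w Y).contains k = false := by rw [hw2, hk]
    apply PySem.Dict.ext
    rw [PySem.Dict.items_insert_of_contains _ _ hw1, PySem.Dict.items_insert_of_not_contains _ _ hk,
        PySem.Dict.items_insert_of_not_contains _ _ hk1, PySem.Dict.items_insert_of_contains _ _ hw,
        List.map_append]
    simp [hne]

theorem bump1_bumpC_comm (num : Int) (d : PySem.Dict String (List Int)) (k : String) (c : Int) (w : String)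
    (hw : d.contains w = true) (hk : k ≠ w) :
    bump1 num (bumpC num d (k, c)) w = bumpC num (bump1 num d w) (k, c) := by
  have hsome : (d.get? w).isSome := by rw [← PySem.Dict.contains_eq_isSome_get?]; exact hw
  obtain ⟨v, hv⟩ := Option.isSome_iff_exists.mp hsome
  have hwk : w ≠ k := Ne.symm hk
  cases hu : d.get? k with
  | some u =>
    simp only [bumpC, bump1, hu, hv,
      PySem.Dict.get?_insert_of_ne _ _ hwk, PySem.Dict.get?_insert_of_ne _ _ hk]
    exact insert_comm_of_ne d k w _ _ hw hk
  | none =>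
    simp only [bumpC, bump1, hu, hv,
      PySem.Dict.get?_insert_of_ne _ _ hwk, PySem.Dict.get?_insert_of_ne _ _ hk]
    exact insert_comm_of_ne d k w _ _ hw hk

theorem foldl_bumpC_bump1 (num : Int) (L : List (String × Int)) (w : String) :
    ∀ d : PySem.Dict String (List Int), d.contains w = true → (∀ p ∈ L, p.1 ≠ w) →
    L.foldl (bumpC num) (bump1 num d w) = bump1 num (L.foldl (bumpC num) d) w := by
  induction L with
  | nil => intro d _ _; rfl
  | cons p L ih =>
    intro d hw hL
    have hp : p.1 ≠ w := hL p (by simp)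
    have h1 : bumpC num (bump1 num d w) p = bump1 num (bumpC num d p) w := by
      rw [← bump1_bumpC_comm num d p.1 p.2 w hw hp]
    calc (p :: L).foldl (bumpC num) (bump1 num d w)
        = L.foldl (bumpC num) (bumpC num (bump1 num d w) p) := by rw [List.foldl_cons]
      _ = L.foldl (bumpC num) (bump1 num (bumpC num d p) w) := by rw [h1]
      _ = bump1 num (L.foldl (bumpC num) (bumpC num d p)) w := by
            exact ih (bumpC num d p) (contains_bumpC_other num d p w hw) (fun q hq => hL q (by simp [hq]))
      _ = bump1 num ((p :: L).foldl (bumpC num) d) w := by rw [List.foldl_cons]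

theorem modify_items_foldl (num : Int) (w : String) (L : List (String × Int)) :
    ∀ d : PySem.Dict String (List Int), (L.map Prod.fst).Nodup →
    (((⟨L⟩ : PySem.Dict String Int).modify w 0 (· + 1)).items).foldl (bumpC num) d
      = bump1 num (L.foldl (bumpC num) d) w := by
  induction L with
  | nil =>
    intro d _
    show ((PySem.Dict.empty.modify w 0 (· + 1)).items).foldl (bumpC num) d = _
    rw [PySem.Dict.modify, PySem.Dict.getD_empty,
      PySem.Dict.items_insert_of_not_contains _ _ (PySem.Dict.contains_empty w)]
    simp [bumpC_one, PySem.Dict.empty]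
  | cons p L ih =>
    intro d hnd
    obtain ⟨p1, p2⟩ := p
    have hndL : (L.map Prod.fst).Nodup := (List.nodup_cons.mp hnd).2
    by_cases hpw : p1 = w
    · -- head is w; the tail contains no w
      have hnotL : ∀ q ∈ L, q.1 ≠ w := by
        intro q hq
        have h1 := (List.nodup_cons.mp hnd).1
        intro hqw
        exact h1 (by simpa [hpw, hqw] using List.mem_map_of_mem (f := Prod.fst) hq)
      have hcont : (⟨(p1, p2) :: L⟩ : PySem.Dict String Int).contains w = true := by
        simp [PySem.Dict.contains_mk, hpw]
      have hget : (⟨(p1, p2) :: L⟩ : PySem.Dict String Int).getD w 0 = p2 := by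
        rw [PySem.Dict.getD_eq_get?_getD]
        simp [PySem.Dict.get?_mk_cons, hpw]
      rw [PySem.Dict.modify, hget, PySem.Dict.items_insert_of_contains _ _ hcont]
      have hmapL : L.map (fun q => if (q.1 == w) = true then (w, p2 + 1) else q) = L := by
        have h0 : L.map (fun q => if (q.1 == w) = true then (w, p2 + 1) else q) = L.map id :=
          List.map_congr_left (fun q hq => by simp [hnotL q hq])
        rw [h0, List.map_id]
      have hhead : (if ((p1, p2).1 == w) = true then (w, p2 + 1) else (p1, p2)) = (w, p2 + 1) := by
        simp [hpw]
      rw [List.map_cons, hhead, hmapL, List.foldl_cons, List.foldl_cons]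
      rw [show bumpC num d (w, p2 + 1) = bump1 num (bumpC num d (w, p2)) w from
            (bump1_bumpC num d w p2).symm]
      rw [foldl_bumpC_bump1 num L w _ (contains_bumpC num d (w, p2)) hnotL]
      rw [show ((p1, p2) : String × Int) = (w, p2) from by rw [hpw]]
    · -- head is another key
      have hcw : (⟨(p1, p2) :: L⟩ : PySem.Dict String Int).contains w = (⟨L⟩ : PySem.Dict String Int).contains w := by
        rw [PySem.Dict.contains_mk, PySem.Dict.contains_mk, List.any_cons]
        simp [hpw]
      have hgw : (⟨(p1, p2) :: L⟩ : PySem.Dict String Int).getD w 0 = (⟨L⟩ : PySem.Dict String Int).getD w 0 := by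
        rw [PySem.Dict.getD_eq_get?_getD, PySem.Dict.getD_eq_get?_getD, PySem.Dict.get?_mk_cons]
        simp [hpw]
      cases hLw : (⟨L⟩ : PySem.Dict String Int).contains w with
      | true =>
        rw [PySem.Dict.modify, hgw,
          PySem.Dict.items_insert_of_contains _ _ (by rw [hcw, hLw]),
          List.map_cons]
        have hfp : (if (((p1, p2) : String × Int).1 == w) = true then (w, (⟨L⟩ : PySem.Dict String Int).getD w 0 + 1) else (p1, p2)) = (p1, p2) := by
          simp [hpw]
        rw [hfp, List.foldl_cons]
        have hih := ih (bumpC num d (p1, p2)) hndL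
        rw [PySem.Dict.modify, PySem.Dict.items_insert_of_contains _ _ hLw] at hih
        rw [hih, List.foldl_cons]
      | false =>
        rw [PySem.Dict.modify, hgw,
          PySem.Dict.items_insert_of_not_contains _ _ (by rw [hcw, hLw])]
        have hgd : (⟨L⟩ : PySem.Dict String Int).getD w 0 = 0 :=
          PySem.Dict.getD_of_not_contains _ _ hLw
        rw [hgd, List.foldl_append]
        simp only [List.foldl_cons, List.foldl_nil]
        rw [show (0 : Int) + 1 = 1 from rfl, bumpC_one]

theorem core (num : Int) (ws : List String) :
    ∀ d : PySem.Dict String (List Int),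
    ws.foldl (bump1 num) d = (PySem.Dict.counter ws).items.foldl (bumpC num) d := by
  induction ws using List.reverseRecOn with
  | nil => intro d; rfl
  | append_singleton ps w ih =>
    intro d
    rw [List.foldl_append, List.foldl_cons, List.foldl_nil, ih, PySem.Dict.counter_append_singleton]
    have hnd : ((PySem.Dict.counter ps).items.map Prod.fst).Nodup := by
      have := PySem.Dict.nodup_keys_counter ps
      simpa [PySem.Dict.keys] using this
    have := modify_items_foldl num w (PySem.Dict.counter ps).items d hnd
    exact this.symm

theorem foldl_range_adj {σ : Type} (l : List Char) (f : σ → Char → Char → σ) :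
    ∀ init : σ,
    (List.range (l.length - 1)).foldl (fun st k => f st (l.getD k ' ') (l.getD (k + 1) ' ')) init
      = (l.zip l.tail).foldl (fun st ab => f st ab.1 ab.2) init := by
  induction l with
  | nil => intro init; rfl
  | cons a t ih =>
    intro init
    cases t with
    | nil => rfl
    | cons b t' =>
      have hlen : (a :: b :: t').length - 1 = (b :: t').length - 1 + 1 := by simp
      rw [hlen, List.range_succ_eq_map, List.foldl_cons, List.foldl_map]
      have hbody : ∀ (st : σ) (k : Nat),
          f st ((a :: b :: t').getD (Nat.succ k) ' ') ((a :: b :: t').getD (Nat.succ k + 1) ' ')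
            = f st ((b :: t').getD k ' ') ((b :: t').getD (k + 1) ' ') := by
        intro st k; rfl
      calc (List.range ((b :: t').length - 1)).foldl
              (fun st k => f st ((a :: b :: t').getD (Nat.succ k) ' ') ((a :: b :: t').getD (Nat.succ k + 1) ' '))
              (f init ((a :: b :: t').getD 0 ' ') ((a :: b :: t').getD 1 ' '))
          = (List.range ((b :: t').length - 1)).foldl
              (fun st k => f st ((b :: t').getD k ' ') ((b :: t').getD (k + 1) ' '))
              (f init a b) := by
              exact PySem.List.foldl_congr_mem _ _ _ _ (fun st k _ => hbody st k)
        _ = ((b :: t').zip (b :: t').tail).foldl (fun st ab => f st ab.1 ab.2) (f init a b) := ih _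
        _ = ((a :: b :: t').zip (a :: b :: t').tail).foldl (fun st ab => f st ab.1 ab.2) init := by
              simp [List.zip_cons_cons]

theorem foldl_pyRange_adj {σ : Type} (l : List Char) (f : σ → Char → Char → σ) (init : σ) :
    (PySem.List.pyRange 0 ((l.length : Int) - 1) 1).foldl
        (fun st i => f st ((PySem.List.pyGet? l i).getD ' ') ((PySem.List.pyGet? l (i + 1)).getD ' ')) init
      = (l.zip l.tail).foldl (fun st ab => f st ab.1 ab.2) init := by
  rw [PySem.List.pyRange_one, List.foldl_map]
  have htn : ((l.length : Int) - 1 - 0).toNat = l.length - 1 := by omega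
  rw [htn]
  have hbody : ∀ (st : σ) (k : Nat), k ∈ List.range (l.length - 1) →
      f st ((PySem.List.pyGet? l (0 + (k : Int))).getD ' ') ((PySem.List.pyGet? l (0 + (k : Int) + 1)).getD ' ')
        = f st (l.getD k ' ') (l.getD (k + 1) ' ') := by
    intro st k _
    have h1 : (0 : Int) + (k : Int) = ((k : Nat) : Int) := by omega
    rw [h1]
    rw [show ((k : Int) + 1) = (((k + 1 : Nat)) : Int) from by push_cast; ring]
    rw [PySem.List.pyGet?_natCast, PySem.List.pyGet?_natCast,
      List.getD_eq_getElem?_getD, List.getD_eq_getElem?_getD]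
  rw [PySem.List.foldl_congr_mem _ _ _ _ hbody]
  exact foldl_range_adj l f init

-- canonical shapes of the two ports
theorem stepA_eq (num : Int) (st : PySem.Dict String (List Int) × Int) (ab : Char × Char) :
    splitA_step num st ab.1 ab.2 =
      if goodPair (PySem.Chars.lowerChar ab.1, PySem.Chars.lowerChar ab.2) then
        (bump1 num st.1 (String.ofList [PySem.Chars.lowerChar ab.1, PySem.Chars.lowerChar ab.2]), st.2 + 1)
      else st := by
  unfold splitA_step
  simp only [goodPair, goodChar, Bool.and_eq_true, decide_eq_true_eq]
  by_cases h1 : (PySem.Chars.lowerChar ab.1).toNat < 97 ∨ 122 < (PySem.Chars.lowerChar ab.1).toNat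
  · rw [if_pos h1, ite_self, if_neg (by omega)]
  · rw [if_neg h1]
    by_cases h2 : (PySem.Chars.lowerChar ab.2).toNat < 97 ∨ 122 < (PySem.Chars.lowerChar ab.2).toNat
    · rw [if_pos h2, if_neg (by omega)]
    · rw [if_neg h2, if_pos (by omega)]
      rfl

theorem foldl_add_one {α : Type} (l : List α) : ∀ a : Int,
    l.foldl (fun n _ => n + 1) a = a + l.length := by
  induction l with
  | nil => intro a; simp
  | cons x t ih => intro a; rw [List.foldl_cons, ih, List.length_cons]; push_cast; ring

set_option maxHeartbeats 1000000 in
theorem splitTwoWord_eq (str : String) (wordDict : List (String × List Int)) (num : Int) :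
    splitTwoWord str wordDict num =
      (((letterWords str).foldl (bump1 num) (⟨wordDict⟩ : PySem.Dict String (List Int))).items,
        (((lowPairs str.toList).filter goodPair).length : Int)) := by
  unfold splitTwoWord letterWords lowPairs
  simp only [PySem.Str.len_eq, PySem.Str.pyGet?_eq, PySem.Chars.pyGet?_eq_listPyGet?]
  rw [foldl_pyRange_adj str.toList (splitA_step num) (((⟨wordDict⟩ : PySem.Dict String (List Int)), 0))]
  rw [PySem.List.foldl_congr_mem (str.toList.zip str.toList.tail)
    (fun (st : PySem.Dict String (List Int) × Int) (ab : Char × Char) => splitA_step num st ab.1 ab.2)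
    (fun st ab =>
      if goodPair (PySem.Chars.lowerChar ab.1, PySem.Chars.lowerChar ab.2) then
        (bump1 num st.1 (String.ofList [PySem.Chars.lowerChar ab.1, PySem.Chars.lowerChar ab.2]), st.2 + 1)
      else st)
    ((⟨wordDict⟩ : PySem.Dict String (List Int)), 0) (fun st ab _ => stepA_eq num st ab)]
  rw [← List.foldl_map (f := fun ab : Char × Char => (PySem.Chars.lowerChar ab.1, PySem.Chars.lowerChar ab.2))
    (g := fun (st : PySem.Dict String (List Int) × Int) (ab : Char × Char) =>
      if goodPair ab then (bump1 num st.1 (String.ofList [ab.1, ab.2]), st.2 + 1) else st)]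
  rw [PySem.List.foldl_if_eq_foldl_filter goodPair
    (fun (st : PySem.Dict String (List Int) × Int) (ab : Char × Char) =>
      (bump1 num st.1 (String.ofList [ab.1, ab.2]), st.2 + 1))]
  have hsplit := PySem.List.foldl_prod_mk
    (f := fun (d : PySem.Dict String (List Int)) (ab : Char × Char) => bump1 num d (String.ofList [ab.1, ab.2]))
    (g := fun (n : Int) (_ : Char × Char) => n + 1)
    (l := List.filter goodPair
      (List.map (fun ab : Char × Char => (PySem.Chars.lowerChar ab.1, PySem.Chars.lowerChar ab.2))
        (str.toList.zip str.toList.tail)))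
    (a := (⟨wordDict⟩ : PySem.Dict String (List Int))) (b := (0 : Int))
  rw [hsplit]
  have hmap := List.foldl_map
    (f := fun ab : Char × Char => String.ofList [ab.1, ab.2])
    (g := bump1 num)
    (l := List.filter goodPair
      (List.map (fun ab : Char × Char => (PySem.Chars.lowerChar ab.1, PySem.Chars.lowerChar ab.2))
        (str.toList.zip str.toList.tail)))
    (init := (⟨wordDict⟩ : PySem.Dict String (List Int)))
  rw [hmap, foldl_add_one]
  norm_num

theorem charCond (c : Char) : ('a' ≤ c ∧ c ≤ 'z') ↔ (97 ≤ c.toNat ∧ c.toNat ≤ 122) := by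
  rw [Char.le_def, Char.le_def, UInt32.le_iff_toNat_le, UInt32.le_iff_toNat_le]
  exact Iff.rfl

-- the word list B builds is exactly letterWords str
theorem words_eq (str : String) :
    (PySem.List.pyRange 0 ((((PySem.Str.lower str).toList).length : Int) - 1) 1).foldl
      (fun (acc : List String) i =>
        let c1 := (PySem.List.pyGet? (PySem.Str.lower str).toList i).getD ' '
        let c2 := (PySem.List.pyGet? (PySem.Str.lower str).toList (i + 1)).getD ' '
        if ('a' ≤ c1 ∧ c1 ≤ 'z') ∧ ('a' ≤ c2 ∧ c2 ≤ 'z') then acc ++ [String.ofList [c1, c2]]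
        else acc) []
    = letterWords str := by
  rw [foldl_pyRange_adj (PySem.Str.lower str).toList
    (fun (acc : List String) c1 c2 =>
      if ('a' ≤ c1 ∧ c1 ≤ 'z') ∧ ('a' ≤ c2 ∧ c2 ≤ 'z') then acc ++ [String.ofList [c1, c2]] else acc) []]
  simp only [PySem.Str.toList_lower, PySem.Chars.lower]
  have hzip : (List.map PySem.Chars.lowerChar str.toList).zip (List.map PySem.Chars.lowerChar str.toList).tail
      = List.map (fun ab : Char × Char => (PySem.Chars.lowerChar ab.1, PySem.Chars.lowerChar ab.2))
          (str.toList.zip str.toList.tail) := by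
    rw [← List.map_tail, List.zip_map]
    exact List.map_congr_left (fun ab _ => rfl)
  rw [hzip]
  have hcond : ∀ (acc : List String) (ab : Char × Char),
      (if ('a' ≤ ab.1 ∧ ab.1 ≤ 'z') ∧ ('a' ≤ ab.2 ∧ ab.2 ≤ 'z') then acc ++ [String.ofList [ab.1, ab.2]] else acc)
        = (if goodPair ab then acc ++ [String.ofList [ab.1, ab.2]] else acc) := by
    intro acc ab
    by_cases h : goodPair ab = true
    · rw [if_pos h, if_pos]
      simp only [goodPair, goodChar, Bool.and_eq_true, decide_eq_true_eq] at h
      exact ⟨(charCond ab.1).mpr h.1, (charCond ab.2).mpr h.2⟩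
    · rw [if_neg h, if_neg]
      intro hc
      apply h
      simp only [goodPair, goodChar, Bool.and_eq_true, decide_eq_true_eq]
      exact ⟨(charCond ab.1).mp hc.1, (charCond ab.2).mp hc.2⟩
  rw [PySem.List.foldl_congr_mem _ _ _ _ (fun acc ab _ => hcond acc ab)]
  rw [PySem.List.foldl_append_if goodPair (fun ab : Char × Char => String.ofList [ab.1, ab.2])]
  simp [letterWords, lowPairs]

theorem splitTwoWord_alt_eq (str : String) (wordDict : List (String × List Int)) (num : Int) :
    splitTwoWord_alt str wordDict num =
      (((letterWords str).foldl (bump1 num) (⟨wordDict⟩ : PySem.Dict String (List Int))).items,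
        (((lowPairs str.toList).filter goodPair).length : Int)) := by
  simp only [splitTwoWord_alt]
  rw [words_eq]
  rw [core]
  congr 1
  · -- the dedup/count fold equals the counter-items fold
    congr 1
    rw [PySem.Dict.items_counter, List.foldl_map]
    rw [PySem.List.dedup_eq_ofList]
    apply PySem.List.foldl_congr_mem
    intro d w _
    rfl
  · simp [letterWords]

-- ===== VERDICT (by name: the statement is the Claim_ definition above) =====
theorem splitTwoWord_spec : Claim_equal_splitTwoWord := by
  intro str wordDict num _ _
  unfold Spec_splitTwoWord
  rw [splitTwoWord_eq, splitTwoWord_alt_eq]
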